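-- pv_equiv track=rewrite | github.com/topliceanu/learn | interview/datadog/coding_challenge.py | intersect
-- ===== SOURCE A (Python) =====
-- def intersect(index, keys):
--     """ Utility method to compute the intersection of all the sets in index
--     that correspond to the given keys keys.
--     Args:
--         index, hash for format {key -> set()}
--         keys, list of strings
--     Returns:
--         set, the intersection of all the sets in index that correspond to keys.
--             If there is at least on key that does not exist in index, this
--             method will return an empty set.
--     """
--     if len(keys) == 0:
--         return set([])
--     if keys[0] not in index:
--         return set([])
--     output = index[keys[0]]
--     for i in range(1, len(keys)):
--         key = keys[i]
--         if key not in index: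
--             return set([])
--         output = output.intersection(index[key])
--     return output
-- ===== SOURCE B (Python) =====
-- def intersect(index, keys):
--     if len(keys) == 0:
--         return set([])
--     for key in keys:
--         if key not in index:
--             return set([])
--     counter = {}
--     for key in keys:
--         for x in index[key]:
--             counter[x] = counter.get(x, 0) + 1
--     n = len(keys)
--     return {x for x in counter if counter[x] == n}
-- ===== Notes on version B (the rewrite author's own statement) =====
-- stated objective: alternative
-- what changed: Replaces the chain of pairwise set.intersection calls with one membership pre-check over the keys followed by a single counting pass over the elements of every selected set; the result is the set of elements whose count equals len(keys).
import Mathlib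
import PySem

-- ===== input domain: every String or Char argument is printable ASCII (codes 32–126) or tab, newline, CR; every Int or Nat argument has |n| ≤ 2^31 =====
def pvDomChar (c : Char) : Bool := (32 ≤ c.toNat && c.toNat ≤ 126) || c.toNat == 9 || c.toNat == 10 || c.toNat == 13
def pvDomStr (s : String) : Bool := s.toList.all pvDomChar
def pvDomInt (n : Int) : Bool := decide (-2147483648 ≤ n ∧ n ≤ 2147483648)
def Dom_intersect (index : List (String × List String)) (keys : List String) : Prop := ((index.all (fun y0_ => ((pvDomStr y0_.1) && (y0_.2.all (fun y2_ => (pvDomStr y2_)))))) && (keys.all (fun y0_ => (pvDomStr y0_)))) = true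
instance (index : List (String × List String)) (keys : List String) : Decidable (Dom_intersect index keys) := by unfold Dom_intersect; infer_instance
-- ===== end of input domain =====

-- B replaces A's chain of pairwise set intersections by one counting pass over all
-- selected sets, returning the elements counted len(keys) times (objective: alternative).


-- ===== PORT A =====
-- the loop 'for i in range(1, len(keys)): …' with its early return, recursing over the remaining keys
def intersectGo (index : List (String × List String)) (output : List String) : List String → List String
  | [] => output
  | key :: rest =>
    if (PySem.Dict.mk index).contains key then
      intersectGo index (PySem.Set.inter output ((PySem.Dict.mk index).getD key [])) rest
    else []

def intersect (index : List (String × List String)) (keys : List String) : List String :=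
  match keys with
  | [] => []
  | k0 :: rest =>
    if (PySem.Dict.mk index).contains k0 then
      intersectGo index ((PySem.Dict.mk index).getD k0 []) rest
    else []

-- ===== PORT B =====
def intersect_alt (index : List (String × List String)) (keys : List String) : List String :=
  if keys.length = 0 then []
  else if keys.all (fun k => (PySem.Dict.mk index).contains k) then
    let counter : PySem.Dict String Int :=
      keys.foldl (fun c k =>
        ((PySem.Dict.mk index).getD k []).foldl (fun c x => c.modify x 0 (· + 1)) c)
        PySem.Dict.empty
    counter.keys.filter (fun x => counter.getD x 0 == (keys.length : Int))
  else []

-- ===== PRECONDITION & SPEC =====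
-- Pre_ requires every value list of index to be duplicate-free: the Python values are sets,
-- and a List String with duplicates does not encode any Python set (A's input cannot carry it).
def Pre_intersect (index : List (String × List String)) (keys : List String) : Prop :=
  ∀ p ∈ index, p.2.Nodup
instance (index : List (String × List String)) (keys : List String) : Decidable (Pre_intersect index keys) := by unfold Pre_intersect; infer_instance

def pvWitness_intersect : (List (String × List String)) × List String :=
  ([("a", ["x", "y"]), ("b", ["y", "z"])], ["a", "b"])

def Spec_intersect (index : List (String × List String)) (keys : List String) (out : List String) : Prop := out = intersect_alt index keys
instance (index : List (String × List String)) (keys : List String) (out : List String) : Decidable (Spec_intersect index keys out) := by unfold Spec_intersect; infer_instance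

-- ===== CLAIM (what is proved, stated in full; the proofs are below) =====
def Claim_equal_intersect : Prop := ∀ (index : List (String × List String)) (keys : List String), Dom_intersect index keys → Pre_intersect index keys → Spec_intersect index keys (intersect index keys)

-- ===== LEMMAS AND PROOFS =====

-- every stored value list is duplicate-free (from Pre_), hence so is every lookup result
theorem getD_nodup (index : List (String × List String)) (h : Pre_intersect index [])
    (k : String) : ((PySem.Dict.mk index).getD k []).Nodup := by
  rcases hg : (PySem.Dict.mk index).get? k with _ | v
  · simp [PySem.Dict.getD_eq_get?_getD, hg]
  · have hm := PySem.Dict.mem_items_of_get?_eq_some _ hg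
    simp [PySem.Dict.getD_eq_get?_getD, hg]
    exact h _ hm

-- A's loop, when every remaining key is present, filters output by membership in each set
theorem intersectGo_all (index : List (String × List String)) :
    ∀ (ks : List String) (out : List String),
      (∀ k ∈ ks, (PySem.Dict.mk index).contains k) →
      intersectGo index out ks =
        out.filter (fun x => ks.all (fun k => ((PySem.Dict.mk index).getD k []).contains x)) := by
  intro ks
  induction ks with
  | nil => intro out _; simp [intersectGo]
  | cons k t ih =>
    intro out h
    have hk := h k (by simp)
    rw [intersectGo, if_pos hk, ih _ (fun k' hk' => h k' (by simp [hk']))]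
    simp only [PySem.Set.inter, List.filter_filter, List.all_cons]
    exact List.filter_congr (fun x _ => by simp [PySem.Set.contains_eq_listContains, Bool.and_comm])

-- A's loop returns [] as soon as a missing key is reached
theorem intersectGo_missing (index : List (String × List String)) :
    ∀ (ks : List String) (out : List String),
      (∃ k ∈ ks, ¬ (PySem.Dict.mk index).contains k) →
      intersectGo index out ks = [] := by
  intro ks
  induction ks with
  | nil => intro out h; simp at h
  | cons k t ih =>
    intro out h
    by_cases hk : (PySem.Dict.mk index).contains k
    · rw [intersectGo, if_pos hk]
      apply ih
      rcases h with ⟨k', hk', hnk'⟩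
      rcases List.mem_cons.mp hk' with rfl | hmem
      · exact absurd hk hnk'
      · exact ⟨k', hmem, hnk'⟩
    · rw [intersectGo, if_neg hk]

-- B's nested fold over keys and their sets is the counting fold over the flattened list
theorem foldl_flat {α : Type} (g : String → List α) (step : PySem.Dict α Int → α → PySem.Dict α Int) :
    ∀ (ks : List String) (c : PySem.Dict α Int),
      ks.foldl (fun c k => (g k).foldl step c) c = (ks.flatMap g).foldl step c := by
  intro ks
  induction ks with
  | nil => intro c; simp
  | cons k t ih => intro c; simp [List.foldl_append, ih]

-- count of x in the flattened selected sets, each duplicate-free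
theorem countFlat_le (g : String → List String) (hg : ∀ k, (g k).Nodup) (x : String) :
    ∀ ks : List String, (ks.flatMap g).count x ≤ ks.length := by
  intro ks
  induction ks with
  | nil => simp
  | cons k t ih =>
    have h1 : (g k).count x ≤ 1 := List.nodup_iff_count_le_one.mp (hg k) x
    simp only [List.flatMap_cons, List.count_append, List.length_cons]
    omega

theorem countFlat_eq (g : String → List String) (hg : ∀ k, (g k).Nodup) (x : String) :
    ∀ ks : List String, ((ks.flatMap g).count x = ks.length ↔ ∀ k ∈ ks, x ∈ g k) := by
  intro ks
  induction ks with
  | nil => simp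
  | cons k t ih =>
    have h1 : (g k).count x ≤ 1 := List.nodup_iff_count_le_one.mp (hg k) x
    have h2 : (t.flatMap g).count x ≤ t.length := countFlat_le g hg x t
    have hmem : x ∈ g k ↔ (g k).count x = 1 := by
      constructor
      · intro hx; have := List.count_pos_iff.mpr hx; omega
      · intro hx; exact List.count_pos_iff.mp (by omega)
    simp only [List.flatMap_cons, List.count_append, List.length_cons, List.mem_cons,
      forall_eq_or_imp, ← ih, hmem]
    omega

-- characterization of B when every key is present
theorem alt_char (index : List (String × List String)) (k0 : String) (rest : List String)
    (hall : ∀ k ∈ k0 :: rest, (PySem.Dict.mk index).contains k) :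
    intersect_alt index (k0 :: rest) =
      (PySem.Set.ofList ((k0 :: rest).flatMap (fun k => (PySem.Dict.mk index).getD k []))).filter
        (fun x => ((((k0 :: rest).flatMap (fun k => (PySem.Dict.mk index).getD k [])).count x : Int))
          == (((k0 :: rest).length : Int))) := by
  have hBcounter :
      ((k0 :: rest).foldl (fun c k =>
          ((PySem.Dict.mk index).getD k []).foldl (fun c x => c.modify x 0 (· + 1)) c)
        PySem.Dict.empty)
      = PySem.Dict.counter ((k0 :: rest).flatMap (fun k => (PySem.Dict.mk index).getD k [])) := by
    rw [foldl_flat, PySem.Dict.counter_eq_foldl]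
  unfold intersect_alt
  rw [if_neg (by simp), if_pos (by simpa using hall)]
  rw [hBcounter]
  simp only [PySem.Dict.keys_counter, PySem.Dict.getD_counter]

-- characterization of A when every key is present
theorem a_char (index : List (String × List String)) (k0 : String) (rest : List String)
    (hall : ∀ k ∈ k0 :: rest, (PySem.Dict.mk index).contains k) :
    intersect index (k0 :: rest) =
      ((PySem.Dict.mk index).getD k0 []).filter
        (fun x => rest.all (fun k => ((PySem.Dict.mk index).getD k []).contains x)) := by
  have hk0 := hall k0 (by simp)
  simp only [intersect]
  rw [if_pos hk0, intersectGo_all index rest _ (fun k hk => hall k (by simp [hk]))]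

-- ===== VERDICT (by name: the statement is the Claim_ definition above) =====
theorem intersect_spec : Claim_equal_intersect := by
  intro index keys _ hpre
  unfold Spec_intersect
  have hnd : ∀ k, ((PySem.Dict.mk index).getD k []).Nodup :=
    getD_nodup index (fun p hp => hpre p hp)
  match keys with
  | [] => simp [intersect, intersect_alt]
  | k0 :: rest =>
    by_cases hall : ∀ k ∈ k0 :: rest, (PySem.Dict.mk index).contains k
    · rw [a_char index k0 rest hall, alt_char index k0 rest hall]
      set g : String → List String := fun k => (PySem.Dict.mk index).getD k [] with hgdef
      set L : List String := (k0 :: rest).flatMap g with hL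
      have hofL : PySem.Set.ofList L =
          g k0 ++ (PySem.Set.ofList (rest.flatMap g)).filter (fun y => !((g k0).contains y)) := by
        rw [hL, List.flatMap_cons, PySem.Set.ofList_append]
        have e1 : PySem.Set.ofList (g k0) = g k0 := PySem.Set.ofList_eq_self_of_nodup _ (hnd k0)
        rw [e1, PySem.Set.update_eq_append_filter]
        simp [PySem.Set.contains_eq_listContains]
      rw [hofL, List.filter_append]
      have hdrop : ((PySem.Set.ofList (rest.flatMap g)).filter (fun y => !((g k0).contains y))).filter
          (fun x => ((L.count x : Int)) == (((k0 :: rest).length : Int))) = [] := by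
        apply List.filter_eq_nil_iff.mpr
        intro x hx
        have hxs : x ∉ g k0 := by
          have := (List.mem_filter.mp hx).2
          simp only [Bool.not_eq_true'] at this
          simpa [List.contains_iff_mem] using this
        have hc0 : (g k0).count x = 0 := List.count_eq_zero_of_not_mem hxs
        have hle : (rest.flatMap g).count x ≤ rest.length := countFlat_le g hnd x rest
        have hcL : L.count x ≤ rest.length := by
          rw [hL, List.flatMap_cons, List.count_append, hc0]; omega
        simp only [beq_iff_eq, Nat.cast_inj]
        intro hcontra
        have : L.count x = (k0 :: rest).length := hcontra
        simp only [List.length_cons] at this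
        omega
      rw [hdrop, List.append_nil]
      symm
      apply List.filter_congr
      intro x hx
      have hc1 : (g k0).count x = 1 := by
        have h1 : (g k0).count x ≤ 1 := List.nodup_iff_count_le_one.mp (hnd k0) x
        have := List.count_pos_iff.mpr hx
        omega
      have hcL : L.count x = 1 + (rest.flatMap g).count x := by
        rw [hL, List.flatMap_cons, List.count_append, hc1]
      have hle : (rest.flatMap g).count x ≤ rest.length := countFlat_le g hnd x rest
      have heq : (L.count x = (k0 :: rest).length) ↔ ((rest.flatMap g).count x = rest.length) := by
        simp only [hcL, List.length_cons]; omega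
      have hmemiff := countFlat_eq g hnd x rest
      apply Bool.eq_iff_iff.mpr
      simp only [beq_iff_eq, Nat.cast_inj, heq, hmemiff, List.all_eq_true]
      constructor
      · intro h k hk; simpa using h k hk
      · intro h k hk; simpa using h k hk
    · -- some key missing: both sides return []
      have hall' : ∃ k ∈ k0 :: rest, ¬ (PySem.Dict.mk index).contains k := by
        simp only [not_forall] at hall
        obtain ⟨k, hk, hnk⟩ := hall
        exact ⟨k, hk, hnk⟩
      have hB : intersect_alt index (k0 :: rest) = [] := by
        unfold intersect_alt
        rw [if_neg (by simp)]
        rw [if_neg]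
        simp only [List.all_eq_true, not_forall]
        rcases hall' with ⟨k, hk, hnk⟩
        exact ⟨k, hk, by simpa using hnk⟩
      rw [hB]
      rcases hall' with ⟨k, hk, hnk⟩
      rcases List.mem_cons.mp hk with rfl | hmem
      · simp only [intersect]; rw [if_neg (by simpa using hnk)]
      · by_cases hk0 : (PySem.Dict.mk index).contains k0
        · simp only [intersect]; rw [if_pos hk0]
          exact intersectGo_missing index rest _ ⟨k, hmem, by simpa using hnk⟩
        · simp only [intersect]; rw [if_neg hk0]
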